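-- pv_equiv track=rewrite | github.com/kyle65463/CS-265 | task2/constant.py | meet
-- ===== SOURCE A (Python) =====
-- def meet(pred_outs):
--     if len(pred_outs) == 0:
--         return {}
--     out = pred_outs[0].copy()
--     for pred in pred_outs[1:]:
--         for key, val in pred.items():
--             if key in out:
--                 if out[key] != val:
--                     out[key] = "?"
--             else:
--                 out[key] = val
--     return out
-- ===== SOURCE B (Python) =====
-- def meet(pred_outs):
--     groups = {}
--     for d in pred_outs:
--         for k, v in d.items():
--             groups.setdefault(k, []).append(v)
--     out = {}
--     for k, vs in groups.items():
--         out[k] = vs[0] if all(v == vs[0] for v in vs) else "?"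
--     return out
-- ===== Notes on version B (the rewrite author's own statement) =====
-- stated objective: alternative
-- what changed: Instead of streaming dicts one by one into an accumulator with per-key conflict updates, B first indexes all values per key into a group dict in one pass and then aggregates each group (first value if all equal, else '?').
import Mathlib
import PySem

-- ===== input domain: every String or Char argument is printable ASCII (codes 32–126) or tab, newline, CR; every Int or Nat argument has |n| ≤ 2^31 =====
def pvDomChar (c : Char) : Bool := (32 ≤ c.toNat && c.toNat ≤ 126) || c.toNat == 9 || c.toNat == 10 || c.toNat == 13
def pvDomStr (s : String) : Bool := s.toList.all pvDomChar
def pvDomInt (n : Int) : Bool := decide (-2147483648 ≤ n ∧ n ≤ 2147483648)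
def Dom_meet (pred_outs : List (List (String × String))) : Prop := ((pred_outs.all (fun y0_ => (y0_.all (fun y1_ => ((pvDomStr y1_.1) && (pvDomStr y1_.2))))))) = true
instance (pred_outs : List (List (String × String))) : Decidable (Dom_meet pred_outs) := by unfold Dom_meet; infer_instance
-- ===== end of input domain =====

-- B replaces A's streaming merge-with-conflict-update by an index-values-per-key-then-aggregate pass (same cost); equivalence proved on dict-shaped inputs.

-- ===== PORT A =====
-- body of A's inner loop: one (key, val) pair processed against the accumulator dict
def meetStep (out : PySem.Dict String String) (kv : String × String) : PySem.Dict String String :=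
  match out.get? kv.1 with
  | some v => if v ≠ kv.2 then out.insert kv.1 "?" else out
  | none => out.insert kv.1 kv.2

def meet (pred_outs : List (List (String × String))) : List (String × String) :=
  match pred_outs with
  | [] => []
  | d0 :: rest =>
    (rest.foldl (fun out pred => pred.foldl meetStep out) (PySem.Dict.mk d0)).items

-- ===== PORT B =====
-- groups.setdefault(k, []).append(v) over every dict: all values per key, in encounter order
def bGroups (pred_outs : List (List (String × String))) : PySem.Dict String (List String) :=
  pred_outs.foldl
    (fun g d => d.foldl (fun g kv => g.modify kv.1 [] (fun vs => vs ++ [kv.2])) g)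
    PySem.Dict.empty

-- vs[0] if all(v == vs[0] for v in vs) else "?"  (the [] case is unreachable: group lists are nonempty)
def aggVal (vs : List String) : String :=
  match vs with
  | [] => "?"
  | v0 :: _ => if vs.all (fun v => v = v0) then v0 else "?"

def meet_alt (pred_outs : List (List (String × String))) : List (String × String) :=
  ((bGroups pred_outs).items.foldl
    (fun o kvs => o.insert kvs.1 (aggVal kvs.2))
    (PySem.Dict.empty : PySem.Dict String String)).items

-- ===== PRECONDITION & SPEC =====
-- In Python the inputs are dicts, which cannot carry duplicate keys; Pre_ only excludes
-- association lists whose FIRST inner list has a duplicate key (A copies that list verbatim),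
-- i.e. lists that do not represent any Python input.
def Pre_meet (pred_outs : List (List (String × String))) : Prop :=
  ((pred_outs.headD []).map Prod.fst).Nodup
instance (pred_outs : List (List (String × String))) : Decidable (Pre_meet pred_outs) := by
  unfold Pre_meet; infer_instance

def pvWitness_meet : (List (List (String × String))) :=
  [[("a", "1"), ("b", "2")], [("a", "1"), ("c", "?")]]

def Spec_meet (pred_outs : List (List (String × String))) (out : List (String × String)) : Prop := out = meet_alt pred_outs
instance (pred_outs : List (List (String × String))) (out : List (String × String)) : Decidable (Spec_meet pred_outs out) := by unfold Spec_meet; infer_instance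

-- ===== CLAIM (what is proved, stated in full; the proofs are below) =====
def Claim_equal_meet : Prop := ∀ (pred_outs : List (List (String × String))), Dom_meet pred_outs → Pre_meet pred_outs → Spec_meet pred_outs (meet pred_outs)

-- ===== LEMMAS AND PROOFS =====

-- common characterization: keys in first-occurrence order, each mapped to the aggregate of its values
def charL (l : List (String × String)) : List (String × String) :=
  (PySem.Set.ofList (l.map Prod.fst)).map
    (fun k => (k, aggVal ((l.filter (fun p => p.1 == k)).map Prod.snd)))

theorem foldl_nested_eq_flat {α β : Type} (f : β → α → β) (ds : List (List α)) (init : β) :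
    ds.foldl (fun o d => d.foldl f o) init = (ds.flatMap id).foldl f init := by
  induction ds generalizing init with
  | nil => rfl
  | cons d t ih => simp [List.foldl_append, ih]

theorem aggVal_snoc (vs : List String) (hv : vs ≠ []) (v : String) :
    aggVal (vs ++ [v]) = if aggVal vs = v then aggVal vs else "?" := by
  obtain ⟨v0, t, rfl⟩ := List.exists_cons_of_ne_nil hv
  simp only [aggVal, List.cons_append, List.all_cons, List.all_append, List.all_nil,
    Bool.and_true, decide_true, Bool.true_and]
  by_cases ht : t.all (fun x => decide (x = v0)) = true
  · by_cases hv0 : v = v0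
    · subst hv0; simp [ht]
    · simp [ht, hv0]
      intro h; exact absurd h.symm hv0
  · simp only [Bool.not_eq_true] at ht
    by_cases hv0 : v = v0 <;> simp [ht, hv0]

theorem filter_key_snoc (t : List (String × String)) (kv : String × String) (j : String) :
    (t ++ [kv]).filter (fun p => p.1 == j) =
      t.filter (fun p => p.1 == j) ++ (if kv.1 = j then [kv] else []) := by
  rw [List.filter_append]
  congr 1
  by_cases h : kv.1 = j <;> simp [h]

theorem mk_eq_foldl (l : List (String × String)) (h : (l.map Prod.fst).Nodup) :
    l.foldl meetStep PySem.Dict.empty = PySem.Dict.mk l := by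
  induction l using List.reverseRecOn with
  | nil => rfl
  | append_singleton t kv ih =>
    rw [List.map_append, List.map_cons, List.map_nil] at h
    have ht : (t.map Prod.fst).Nodup := h.of_append_left
    have hk : kv.1 ∉ t.map Prod.fst := fun hm =>
      (List.disjoint_of_nodup_append h) hm (by simp)
    rw [List.foldl_append, List.foldl_cons, List.foldl_nil, ih ht]
    have hget : (PySem.Dict.mk t).get? kv.1 = none := by
      rw [PySem.Dict.get?_eq_none_iff_not_mem_keys]
      simpa [PySem.Dict.keys_mk] using hk
    have hcont : (PySem.Dict.mk t).contains kv.1 = false := by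
      rw [PySem.Dict.contains_eq_isSome_get?, hget]; rfl
    apply PySem.Dict.ext
    simp only [meetStep, hget]
    rw [PySem.Dict.items_insert_of_not_contains _ _ hcont]

theorem charL_keys (l : List (String × String)) :
    (charL l).map Prod.fst = PySem.Set.ofList (l.map Prod.fst) := by
  unfold charL
  rw [List.map_map]
  exact (List.map_congr_left fun a _ => rfl).trans (List.map_id _)

theorem master (l : List (String × String)) :
    (l.foldl meetStep PySem.Dict.empty).items = charL l := by
  induction l using List.reverseRecOn with
  | nil => rfl
  | append_singleton t kv ih =>
    rw [List.foldl_append, List.foldl_cons, List.foldl_nil]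
    set D := t.foldl meetStep PySem.Dict.empty with hD
    have hkeys : D.keys = PySem.Set.ofList (t.map Prod.fst) := by
      have h1 : D.keys = D.items.map Prod.fst := rfl
      rw [h1, ih, charL_keys]
    have hnd : D.keys.Nodup := by rw [hkeys]; exact PySem.Set.nodup_ofList _
    have hval : ∀ j : String, j ∈ PySem.Set.ofList (t.map Prod.fst) →
        D.get? j = some (aggVal ((t.filter (fun p => p.1 == j)).map Prod.snd)) := by
      intro j hj
      apply PySem.Dict.get?_of_mem_items _ _ hnd
      have h2 : (j, aggVal ((t.filter (fun p => p.1 == j)).map Prod.snd)) ∈ charL t := by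
        simp only [charL, List.mem_map]
        exact ⟨j, hj, rfl⟩
      rw [show D.items = charL t from ih]
      exact h2
    have hvs_ne : ∀ j : String, j ∈ t.map Prod.fst →
        (t.filter (fun p => p.1 == j)).map Prod.snd ≠ [] := by
      intro j hj
      obtain ⟨p, hp, hpj⟩ := List.mem_map.mp hj
      have hmemf : p ∈ t.filter (fun p => p.1 == j) :=
        List.mem_filter.mpr ⟨hp, by simp [hpj]⟩
      intro hnil
      rw [List.map_eq_nil_iff] at hnil
      rw [hnil] at hmemf
      simp at hmemf
    by_cases hk : kv.1 ∈ t.map Prod.fst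
    · -- key already present
      have hmem : kv.1 ∈ PySem.Set.ofList (t.map Prod.fst) := (PySem.Set.mem_ofList _ _).mpr hk
      have hget := hval kv.1 hmem
      have hkeysnew : PySem.Set.ofList ((t ++ [kv]).map Prod.fst) = PySem.Set.ofList (t.map Prod.fst) := by
        rw [List.map_append, List.map_cons, List.map_nil, PySem.Set.ofList_append_singleton,
          PySem.Set.add_of_mem hmem]
      set a := aggVal ((t.filter (fun p => p.1 == kv.1)).map Prod.snd) with ha
      have hsnoc : aggVal (((t ++ [kv]).filter (fun p => p.1 == kv.1)).map Prod.snd)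
          = if a = kv.2 then a else "?" := by
        rw [filter_key_snoc, if_pos rfl, List.map_append]
        exact aggVal_snoc _ (hvs_ne kv.1 hk) _
      simp only [meetStep, hget]
      by_cases heq : a = kv.2
      · -- value agrees: dict unchanged
        rw [if_neg (fun hc => hc heq), ih]
        unfold charL
        rw [hkeysnew]
        apply List.map_congr_left
        intro j hj
        by_cases hjk : kv.1 = j
        · subst hjk
          rw [filter_key_snoc, if_pos rfl, List.map_append]
          simp only [List.map_cons, List.map_nil]
          rw [aggVal_snoc _ (hvs_ne kv.1 hk) _, ← ha, if_pos heq]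
        · rw [filter_key_snoc, if_neg hjk, List.append_nil]
      · -- conflict: out[key] = "?"
        rw [if_pos heq]
        have hcont : D.contains kv.1 = true := by
          rw [PySem.Dict.contains_eq_isSome_get?, hget]; rfl
        rw [PySem.Dict.items_insert_of_contains _ _ hcont, ih]
        unfold charL
        rw [hkeysnew, List.map_map]
        apply List.map_congr_left
        intro j hj
        by_cases hjk : kv.1 = j
        · subst hjk
          simp only [Function.comp_apply, beq_self_eq_true, if_pos]
          rw [hsnoc, if_neg heq]
        · have hb : (j == kv.1) = false := by simp [Ne.symm hjk]
          simp only [Function.comp_apply, hb, Bool.false_eq_true, if_false]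
          rw [filter_key_snoc, if_neg hjk, List.append_nil]
    · -- new key: appended at the end
      have hnmem : kv.1 ∉ PySem.Set.ofList (t.map Prod.fst) := fun hm =>
        hk ((PySem.Set.mem_ofList _ _).mp hm)
      have hget : D.get? kv.1 = none := by
        rw [PySem.Dict.get?_eq_none_iff_not_mem_keys, hkeys]
        exact hnmem
      have hcont : D.contains kv.1 = false := by
        rw [PySem.Dict.contains_eq_isSome_get?, hget]; rfl
      simp only [meetStep, hget]
      rw [PySem.Dict.items_insert_of_not_contains _ _ hcont, ih]
      unfold charL
      rw [List.map_append, List.map_cons, List.map_nil, PySem.Set.ofList_append_singleton,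
        PySem.Set.add_of_not_mem hnmem, List.map_append]
      congr 1
      · apply List.map_congr_left
        intro j hj
        have hjk : kv.1 ≠ j := fun hh => hnmem (hh ▸ hj)
        rw [filter_key_snoc, if_neg hjk, List.append_nil]
      · simp only [List.map_cons, List.map_nil]
        rw [filter_key_snoc, if_pos rfl]
        have hnilf : t.filter (fun p => p.1 == kv.1) = [] := by
          rw [List.filter_eq_nil_iff]
          intro p hp
          simp only [beq_iff_eq]
          intro hh
          exact hk (hh ▸ List.mem_map_of_mem hp)
        rw [hnilf, List.nil_append]
        simp [aggVal]

theorem meet_alt_eq_charL (ds : List (List (String × String))) :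
    meet_alt ds = charL (ds.flatMap id) := by
  unfold meet_alt bGroups
  rw [foldl_nested_eq_flat]
  set flat := ds.flatMap id with hflat
  set groups := flat.foldl (fun g kv => g.modify kv.1 [] (fun vs => vs ++ [kv.2]))
    (PySem.Dict.empty : PySem.Dict String (List String)) with hg
  have hkeys : groups.keys = PySem.Set.ofList (flat.map Prod.fst) := by
    have h1 := PySem.Dict.keys_foldl_modify_key flat Prod.fst []
      (fun _ kv vs => vs ++ [kv.2]) (PySem.Dict.empty : PySem.Dict String (List String))
    rw [show (PySem.Dict.empty : PySem.Dict String (List String)).keys = [] from rfl,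
      PySem.Set.update_nil_left] at h1
    exact h1
  have hnd : groups.keys.Nodup := by rw [hkeys]; exact PySem.Set.nodup_ofList _
  have hgetD : ∀ k : String,
      groups.getD k [] = (flat.filter (fun p => p.1 == k)).map Prod.snd := by
    intro k
    have h2 := PySem.Dict.getD_foldl_modify_append flat
      (PySem.Dict.empty : PySem.Dict String (List String)) k
    rw [show (PySem.Dict.empty : PySem.Dict String (List String)).getD k [] = [] from rfl,
      List.nil_append] at h2
    exact h2
  have hitems : groups.items = groups.keys.map (fun k => (k, groups.getD k [])) :=
    PySem.Dict.items_eq_map_keys _ hnd []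
  have hfresh : ∀ a ∈ groups.items,
      (PySem.Dict.empty : PySem.Dict String String).contains a.1 = false := by
    intro a _; exact PySem.Dict.contains_empty _
  have hndk : (groups.items.map Prod.fst).Nodup := hnd
  have hout : (groups.items.foldl (fun o kvs => o.insert kvs.1 (aggVal kvs.2))
        (PySem.Dict.empty : PySem.Dict String String)).items
      = (PySem.Dict.empty : PySem.Dict String String).items
        ++ groups.items.map (fun kvs => (kvs.1, aggVal kvs.2)) :=
    PySem.Dict.items_foldl_insert_fresh groups.items (fun kvs => kvs.1)
      (fun kvs => aggVal kvs.2) _ hfresh hndk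
  rw [hout, show (PySem.Dict.empty : PySem.Dict String String).items = [] from rfl,
    List.nil_append, hitems, List.map_map, hkeys]
  unfold charL
  apply List.map_congr_left
  intro j hj
  simp [hgetD j]

-- ===== VERDICT (by name: the statement is the Claim_ definition above) =====
theorem meet_spec : Claim_equal_meet := by
  intro pred_outs _ hpre
  unfold Spec_meet
  rw [meet_alt_eq_charL]
  match pred_outs with
  | [] => rfl
  | d0 :: rest =>
    have hpre' : (d0.map Prod.fst).Nodup := hpre
    have h1 : meet (d0 :: rest)
        = (rest.foldl (fun out pred => pred.foldl meetStep out) (PySem.Dict.mk d0)).items := rfl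
    rw [h1, foldl_nested_eq_flat meetStep rest (PySem.Dict.mk d0), ← mk_eq_foldl d0 hpre',
      ← List.foldl_append]
    have h2 : d0 ++ rest.flatMap id = (d0 :: rest).flatMap id := by simp
    rw [h2]
    exact master _
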